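-- pv_equiv track=rewrite | github.com/beknurakhmed/ai-chatbot | backend/app/services/timetable_service.py | _time_to_period
-- ===== SOURCE A (Python) =====
-- PERIOD_TIMES = {
--     "A": ("08:30", "09:45"),
--     "B": ("10:00", "11:15"),
--     "C": ("11:30", "12:45"),
--     "D": ("13:30", "14:45"),
--     "E": ("15:00", "16:15"),
--     "F": ("16:30", "17:45"),
--     "G": ("18:00", "19:15"),
-- }
--
-- def _time_to_period(time_str: str) -> str | None:
--     """Convert a time like '12:00' to the matching period letter."""
--     try:
--         h, m = map(int, time_str.split(":"))
--         t = h * 60 + m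
--         for period, (start, end) in PERIOD_TIMES.items():
--             sh, sm = map(int, start.split(":"))
--             eh, em = map(int, end.split(":"))
--             if sh * 60 + sm <= t <= eh * 60 + em:
--                 return period
--         # If between periods, find the next one
--         for period, (start, _) in PERIOD_TIMES.items():
--             sh, sm = map(int, start.split(":"))
--             if t < sh * 60 + sm:
--                 return period
--     except Exception:
--         pass
--     return None
-- ===== SOURCE B (Python) =====
-- PERIOD_TIMES = {
--     "A": ("08:30", "09:45"),
--     "B": ("10:00", "11:15"),
--     "C": ("11:30", "12:45"),
--     "D": ("13:30", "14:45"),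
--     "E": ("15:00", "16:15"),
--     "F": ("16:30", "17:45"),
--     "G": ("18:00", "19:15"),
-- }
--
--
-- def _time_to_period(time_str: str) -> str | None:
--     """Convert a time like '12:00' to the matching period letter."""
--     try:
--         h, m = map(int, time_str.split(":"))
--         t = h * 60 + m
--         # Periods are ordered and non-overlapping, so the first period whose
--         # end is >= t is either the in-interval match or the next period.
--         for period, (_, end) in PERIOD_TIMES.items():
--             eh, em = map(int, end.split(":"))
--             if t <= eh * 60 + em:
--                 return period
--     except Exception:
--         pass
--     return None
-- ===== Notes on version B (the rewrite author's own statement) =====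
-- stated objective: simpler
-- what changed: Replaces A's two scans (in-interval match, then next-period search) with one scan that returns the first period whose end time is >= t, valid because the periods are ordered and non-overlapping; start times are never parsed.
import Mathlib
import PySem

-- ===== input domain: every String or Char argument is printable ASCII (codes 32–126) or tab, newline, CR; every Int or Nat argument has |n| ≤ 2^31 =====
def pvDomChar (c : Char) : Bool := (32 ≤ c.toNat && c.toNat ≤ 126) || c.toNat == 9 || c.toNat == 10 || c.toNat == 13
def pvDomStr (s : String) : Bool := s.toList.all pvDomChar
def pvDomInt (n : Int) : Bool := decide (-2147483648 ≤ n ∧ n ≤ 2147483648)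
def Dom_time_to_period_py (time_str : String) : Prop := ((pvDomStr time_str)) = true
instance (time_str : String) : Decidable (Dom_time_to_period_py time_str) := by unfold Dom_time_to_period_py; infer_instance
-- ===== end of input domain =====

-- B replaces A's two scans of the period table with one scan on end times; objective: simpler.

-- ===== PORT A =====
-- PERIOD_TIMES as an insertion-ordered association list (period, (start, end)).
def pvPeriods : List (String × String × String) :=
  [("A", "08:30", "09:45"), ("B", "10:00", "11:15"), ("C", "11:30", "12:45"),
   ("D", "13:30", "14:45"), ("E", "15:00", "16:15"), ("F", "16:30", "17:45"),
   ("G", "18:00", "19:15")]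

-- `h, m = map(int, s.split(":")); h * 60 + m` — none exactly where Python raises
-- (wrong number of parts, or int() ValueError); both A and B run this same code.
def pvParseHM (s : String) : Option Int :=
  match PySem.Str.split? s ":" with
  | some [a, b] =>
    match PySem.Int.ofStr? a, PySem.Int.ofStr? b with
    | some h, some m => some (h * 60 + m)
    | _, _ => none
  | _ => none

-- A's first loop: `some r` = early return/raise with overall result r, `none` = fell through.
def pvLoop1 (t : Int) : List (String × String × String) → Option (Option String)
  | [] => none
  | (p, s, e) :: rest =>
    match pvParseHM s, pvParseHM e with
    | some st, some en => if st ≤ t ∧ t ≤ en then some (some p) else pvLoop1 t rest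
    | _, _ => some none   -- a raise inside the loop: caught, overall None

-- A's second loop (a raise and falling through both end as None).
def pvLoop2 (t : Int) : List (String × String × String) → Option String
  | [] => none
  | (p, s, _) :: rest =>
    match pvParseHM s with
    | some st => if t < st then some p else pvLoop2 t rest
    | none => none

def time_to_period_py (time_str : String) : Option String :=
  match pvParseHM time_str with
  | none => none
  | some t =>
    match pvLoop1 t pvPeriods with
    | some r => r
    | none => pvLoop2 t pvPeriods

-- ===== PORT B =====
-- B's single loop: first period whose end minute is ≥ t.
def pvLoopB (t : Int) : List (String × String × String) → Option String
  | [] => none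
  | (p, _, e) :: rest =>
    match pvParseHM e with
    | some en => if t ≤ en then some p else pvLoopB t rest
    | none => none

def time_to_period_py_alt (time_str : String) : Option String :=
  match pvParseHM time_str with
  | none => none
  | some t => pvLoopB t pvPeriods

-- ===== PRECONDITION & SPEC =====
def Spec_time_to_period_py (time_str : String) (out : Option String) : Prop := out = time_to_period_py_alt time_str
instance (time_str : String) (out : Option String) : Decidable (Spec_time_to_period_py time_str out) := by unfold Spec_time_to_period_py; infer_instance

-- ===== CLAIM (what is proved, stated in full; the proofs are below) =====
def Claim_equal_time_to_period_py : Prop := ∀ (time_str : String), Dom_time_to_period_py time_str → Spec_time_to_period_py time_str (time_to_period_py time_str)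

-- ===== LEMMAS AND PROOFS =====

lemma pvLoop1_nil (t : Int) : pvLoop1 t [] = none := rfl
lemma pvLoop2_nil (t : Int) : pvLoop2 t [] = none := rfl
lemma pvLoopB_nil (t : Int) : pvLoopB t [] = none := rfl

-- Unfold one iteration of each loop once the table strings are parsed.
lemma pvLoop1_cons (t st en : Int) (p s e : String) (rest : List (String × String × String))
    (hs : pvParseHM s = some st) (he : pvParseHM e = some en) :
    pvLoop1 t ((p, s, e) :: rest)
      = if st ≤ t ∧ t ≤ en then some (some p) else pvLoop1 t rest := by
  simp [pvLoop1, hs, he]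

lemma pvLoop2_cons (t st : Int) (p s e : String) (rest : List (String × String × String))
    (hs : pvParseHM s = some st) :
    pvLoop2 t ((p, s, e) :: rest) = if t < st then some p else pvLoop2 t rest := by
  simp [pvLoop2, hs]

lemma pvLoopB_cons (t en : Int) (p s e : String) (rest : List (String × String × String))
    (he : pvParseHM e = some en) :
    pvLoopB t ((p, s, e) :: rest) = if t ≤ en then some p else pvLoopB t rest := by
  simp [pvLoopB, he]

-- For every minute value t, A's two scans of the fixed table agree with B's single scan.
lemma pvLoops_agree (t : Int) :
    (match pvLoop1 t pvPeriods with
     | some r => r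
     | none => pvLoop2 t pvPeriods) = pvLoopB t pvPeriods := by
  have h1 : pvParseHM "08:30" = some 510 := by decide
  have h2 : pvParseHM "09:45" = some 585 := by decide
  have h3 : pvParseHM "10:00" = some 600 := by decide
  have h4 : pvParseHM "11:15" = some 675 := by decide
  have h5 : pvParseHM "11:30" = some 690 := by decide
  have h6 : pvParseHM "12:45" = some 765 := by decide
  have h7 : pvParseHM "13:30" = some 810 := by decide
  have h8 : pvParseHM "14:45" = some 885 := by decide
  have h9 : pvParseHM "15:00" = some 900 := by decide
  have h10 : pvParseHM "16:15" = some 975 := by decide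
  have h11 : pvParseHM "16:30" = some 990 := by decide
  have h12 : pvParseHM "17:45" = some 1065 := by decide
  have h13 : pvParseHM "18:00" = some 1080 := by decide
  have h14 : pvParseHM "19:15" = some 1155 := by decide
  rw [pvPeriods,
    pvLoop1_cons t 510 585 _ _ _ _ h1 h2, pvLoop1_cons t 600 675 _ _ _ _ h3 h4,
    pvLoop1_cons t 690 765 _ _ _ _ h5 h6, pvLoop1_cons t 810 885 _ _ _ _ h7 h8,
    pvLoop1_cons t 900 975 _ _ _ _ h9 h10, pvLoop1_cons t 990 1065 _ _ _ _ h11 h12,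
    pvLoop1_cons t 1080 1155 _ _ _ _ h13 h14,
    pvLoop2_cons t 510 _ _ _ _ h1, pvLoop2_cons t 600 _ _ _ _ h3,
    pvLoop2_cons t 690 _ _ _ _ h5, pvLoop2_cons t 810 _ _ _ _ h7,
    pvLoop2_cons t 900 _ _ _ _ h9, pvLoop2_cons t 990 _ _ _ _ h11,
    pvLoop2_cons t 1080 _ _ _ _ h13,
    pvLoopB_cons t 585 _ _ _ _ h2, pvLoopB_cons t 675 _ _ _ _ h4,
    pvLoopB_cons t 765 _ _ _ _ h6, pvLoopB_cons t 885 _ _ _ _ h8,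
    pvLoopB_cons t 975 _ _ _ _ h10, pvLoopB_cons t 1065 _ _ _ _ h12,
    pvLoopB_cons t 1155 _ _ _ _ h14]
  rw [pvLoop1_nil, pvLoop2_nil, pvLoopB_nil]
  by_cases b0 : t ≤ (585:Int)
  · by_cases a0 : (510:Int) ≤ t
    · have c : ((510:Int) ≤ t ∧ t ≤ 585) := ⟨a0, b0⟩
      rw [if_pos c, if_pos b0]
    · -- gap before this period
      have hn0 : ¬((510:Int) ≤ t ∧ t ≤ 585) := by omega
      have hn1 : ¬((600:Int) ≤ t ∧ t ≤ 675) := by omega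
      have hn2 : ¬((690:Int) ≤ t ∧ t ≤ 765) := by omega
      have hn3 : ¬((810:Int) ≤ t ∧ t ≤ 885) := by omega
      have hn4 : ¬((900:Int) ≤ t ∧ t ≤ 975) := by omega
      have hn5 : ¬((990:Int) ≤ t ∧ t ≤ 1065) := by omega
      have hn6 : ¬((1080:Int) ≤ t ∧ t ≤ 1155) := by omega
      have hp : (t < (510:Int)) := by omega
      rw [if_neg hn0, if_neg hn1, if_neg hn2, if_neg hn3, if_neg hn4, if_neg hn5, if_neg hn6, if_pos hp, if_pos b0]
  · -- t past period 0; continue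
    by_cases b1 : t ≤ (675:Int)
    · by_cases a1 : (600:Int) ≤ t
      · have c : ((600:Int) ≤ t ∧ t ≤ 675) := ⟨a1, b1⟩
        have hn0 : ¬((510:Int) ≤ t ∧ t ≤ 585) := by omega
        rw [if_neg hn0, if_pos c, if_neg b0, if_pos b1]
      · -- gap before this period
        have hn0 : ¬((510:Int) ≤ t ∧ t ≤ 585) := by omega
        have hn1 : ¬((600:Int) ≤ t ∧ t ≤ 675) := by omega
        have hn2 : ¬((690:Int) ≤ t ∧ t ≤ 765) := by omega
        have hn3 : ¬((810:Int) ≤ t ∧ t ≤ 885) := by omega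
        have hn4 : ¬((900:Int) ≤ t ∧ t ≤ 975) := by omega
        have hn5 : ¬((990:Int) ≤ t ∧ t ≤ 1065) := by omega
        have hn6 : ¬((1080:Int) ≤ t ∧ t ≤ 1155) := by omega
        have hq0 : ¬(t < (510:Int)) := by omega
        have hp : (t < (600:Int)) := by omega
        rw [if_neg hn0, if_neg hn1, if_neg hn2, if_neg hn3, if_neg hn4, if_neg hn5, if_neg hn6, if_neg hq0, if_pos hp, if_neg b0, if_pos b1]
    · -- t past period 1; continue
      by_cases b2 : t ≤ (765:Int)
      · by_cases a2 : (690:Int) ≤ t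
        · have c : ((690:Int) ≤ t ∧ t ≤ 765) := ⟨a2, b2⟩
          have hn0 : ¬((510:Int) ≤ t ∧ t ≤ 585) := by omega
          have hn1 : ¬((600:Int) ≤ t ∧ t ≤ 675) := by omega
          rw [if_neg hn0, if_neg hn1, if_pos c, if_neg b0, if_neg b1, if_pos b2]
        · -- gap before this period
          have hn0 : ¬((510:Int) ≤ t ∧ t ≤ 585) := by omega
          have hn1 : ¬((600:Int) ≤ t ∧ t ≤ 675) := by omega
          have hn2 : ¬((690:Int) ≤ t ∧ t ≤ 765) := by omega
          have hn3 : ¬((810:Int) ≤ t ∧ t ≤ 885) := by omega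
          have hn4 : ¬((900:Int) ≤ t ∧ t ≤ 975) := by omega
          have hn5 : ¬((990:Int) ≤ t ∧ t ≤ 1065) := by omega
          have hn6 : ¬((1080:Int) ≤ t ∧ t ≤ 1155) := by omega
          have hq0 : ¬(t < (510:Int)) := by omega
          have hq1 : ¬(t < (600:Int)) := by omega
          have hp : (t < (690:Int)) := by omega
          rw [if_neg hn0, if_neg hn1, if_neg hn2, if_neg hn3, if_neg hn4, if_neg hn5, if_neg hn6, if_neg hq0, if_neg hq1, if_pos hp, if_neg b0, if_neg b1, if_pos b2]
      · -- t past period 2; continue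
        by_cases b3 : t ≤ (885:Int)
        · by_cases a3 : (810:Int) ≤ t
          · have c : ((810:Int) ≤ t ∧ t ≤ 885) := ⟨a3, b3⟩
            have hn0 : ¬((510:Int) ≤ t ∧ t ≤ 585) := by omega
            have hn1 : ¬((600:Int) ≤ t ∧ t ≤ 675) := by omega
            have hn2 : ¬((690:Int) ≤ t ∧ t ≤ 765) := by omega
            rw [if_neg hn0, if_neg hn1, if_neg hn2, if_pos c, if_neg b0, if_neg b1, if_neg b2, if_pos b3]
          · -- gap before this period
            have hn0 : ¬((510:Int) ≤ t ∧ t ≤ 585) := by omega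
            have hn1 : ¬((600:Int) ≤ t ∧ t ≤ 675) := by omega
            have hn2 : ¬((690:Int) ≤ t ∧ t ≤ 765) := by omega
            have hn3 : ¬((810:Int) ≤ t ∧ t ≤ 885) := by omega
            have hn4 : ¬((900:Int) ≤ t ∧ t ≤ 975) := by omega
            have hn5 : ¬((990:Int) ≤ t ∧ t ≤ 1065) := by omega
            have hn6 : ¬((1080:Int) ≤ t ∧ t ≤ 1155) := by omega
            have hq0 : ¬(t < (510:Int)) := by omega
            have hq1 : ¬(t < (600:Int)) := by omega
            have hq2 : ¬(t < (690:Int)) := by omega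
            have hp : (t < (810:Int)) := by omega
            rw [if_neg hn0, if_neg hn1, if_neg hn2, if_neg hn3, if_neg hn4, if_neg hn5, if_neg hn6, if_neg hq0, if_neg hq1, if_neg hq2, if_pos hp, if_neg b0, if_neg b1, if_neg b2, if_pos b3]
        · -- t past period 3; continue
          by_cases b4 : t ≤ (975:Int)
          · by_cases a4 : (900:Int) ≤ t
            · have c : ((900:Int) ≤ t ∧ t ≤ 975) := ⟨a4, b4⟩
              have hn0 : ¬((510:Int) ≤ t ∧ t ≤ 585) := by omega
              have hn1 : ¬((600:Int) ≤ t ∧ t ≤ 675) := by omega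
              have hn2 : ¬((690:Int) ≤ t ∧ t ≤ 765) := by omega
              have hn3 : ¬((810:Int) ≤ t ∧ t ≤ 885) := by omega
              rw [if_neg hn0, if_neg hn1, if_neg hn2, if_neg hn3, if_pos c, if_neg b0, if_neg b1, if_neg b2, if_neg b3, if_pos b4]
            · -- gap before this period
              have hn0 : ¬((510:Int) ≤ t ∧ t ≤ 585) := by omega
              have hn1 : ¬((600:Int) ≤ t ∧ t ≤ 675) := by omega
              have hn2 : ¬((690:Int) ≤ t ∧ t ≤ 765) := by omega
              have hn3 : ¬((810:Int) ≤ t ∧ t ≤ 885) := by omega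
              have hn4 : ¬((900:Int) ≤ t ∧ t ≤ 975) := by omega
              have hn5 : ¬((990:Int) ≤ t ∧ t ≤ 1065) := by omega
              have hn6 : ¬((1080:Int) ≤ t ∧ t ≤ 1155) := by omega
              have hq0 : ¬(t < (510:Int)) := by omega
              have hq1 : ¬(t < (600:Int)) := by omega
              have hq2 : ¬(t < (690:Int)) := by omega
              have hq3 : ¬(t < (810:Int)) := by omega
              have hp : (t < (900:Int)) := by omega
              rw [if_neg hn0, if_neg hn1, if_neg hn2, if_neg hn3, if_neg hn4, if_neg hn5, if_neg hn6, if_neg hq0, if_neg hq1, if_neg hq2, if_neg hq3, if_pos hp, if_neg b0, if_neg b1, if_neg b2, if_neg b3, if_pos b4]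
          · -- t past period 4; continue
            by_cases b5 : t ≤ (1065:Int)
            · by_cases a5 : (990:Int) ≤ t
              · have c : ((990:Int) ≤ t ∧ t ≤ 1065) := ⟨a5, b5⟩
                have hn0 : ¬((510:Int) ≤ t ∧ t ≤ 585) := by omega
                have hn1 : ¬((600:Int) ≤ t ∧ t ≤ 675) := by omega
                have hn2 : ¬((690:Int) ≤ t ∧ t ≤ 765) := by omega
                have hn3 : ¬((810:Int) ≤ t ∧ t ≤ 885) := by omega
                have hn4 : ¬((900:Int) ≤ t ∧ t ≤ 975) := by omega
                rw [if_neg hn0, if_neg hn1, if_neg hn2, if_neg hn3, if_neg hn4, if_pos c, if_neg b0, if_neg b1, if_neg b2, if_neg b3, if_neg b4, if_pos b5]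
              · -- gap before this period
                have hn0 : ¬((510:Int) ≤ t ∧ t ≤ 585) := by omega
                have hn1 : ¬((600:Int) ≤ t ∧ t ≤ 675) := by omega
                have hn2 : ¬((690:Int) ≤ t ∧ t ≤ 765) := by omega
                have hn3 : ¬((810:Int) ≤ t ∧ t ≤ 885) := by omega
                have hn4 : ¬((900:Int) ≤ t ∧ t ≤ 975) := by omega
                have hn5 : ¬((990:Int) ≤ t ∧ t ≤ 1065) := by omega
                have hn6 : ¬((1080:Int) ≤ t ∧ t ≤ 1155) := by omega
                have hq0 : ¬(t < (510:Int)) := by omega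
                have hq1 : ¬(t < (600:Int)) := by omega
                have hq2 : ¬(t < (690:Int)) := by omega
                have hq3 : ¬(t < (810:Int)) := by omega
                have hq4 : ¬(t < (900:Int)) := by omega
                have hp : (t < (990:Int)) := by omega
                rw [if_neg hn0, if_neg hn1, if_neg hn2, if_neg hn3, if_neg hn4, if_neg hn5, if_neg hn6, if_neg hq0, if_neg hq1, if_neg hq2, if_neg hq3, if_neg hq4, if_pos hp, if_neg b0, if_neg b1, if_neg b2, if_neg b3, if_neg b4, if_pos b5]
            · -- t past period 5; continue
              by_cases b6 : t ≤ (1155:Int)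
              · by_cases a6 : (1080:Int) ≤ t
                · have c : ((1080:Int) ≤ t ∧ t ≤ 1155) := ⟨a6, b6⟩
                  have hn0 : ¬((510:Int) ≤ t ∧ t ≤ 585) := by omega
                  have hn1 : ¬((600:Int) ≤ t ∧ t ≤ 675) := by omega
                  have hn2 : ¬((690:Int) ≤ t ∧ t ≤ 765) := by omega
                  have hn3 : ¬((810:Int) ≤ t ∧ t ≤ 885) := by omega
                  have hn4 : ¬((900:Int) ≤ t ∧ t ≤ 975) := by omega
                  have hn5 : ¬((990:Int) ≤ t ∧ t ≤ 1065) := by omega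
                  rw [if_neg hn0, if_neg hn1, if_neg hn2, if_neg hn3, if_neg hn4, if_neg hn5, if_pos c, if_neg b0, if_neg b1, if_neg b2, if_neg b3, if_neg b4, if_neg b5, if_pos b6]
                · -- gap before this period
                  have hn0 : ¬((510:Int) ≤ t ∧ t ≤ 585) := by omega
                  have hn1 : ¬((600:Int) ≤ t ∧ t ≤ 675) := by omega
                  have hn2 : ¬((690:Int) ≤ t ∧ t ≤ 765) := by omega
                  have hn3 : ¬((810:Int) ≤ t ∧ t ≤ 885) := by omega
                  have hn4 : ¬((900:Int) ≤ t ∧ t ≤ 975) := by omega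
                  have hn5 : ¬((990:Int) ≤ t ∧ t ≤ 1065) := by omega
                  have hn6 : ¬((1080:Int) ≤ t ∧ t ≤ 1155) := by omega
                  have hq0 : ¬(t < (510:Int)) := by omega
                  have hq1 : ¬(t < (600:Int)) := by omega
                  have hq2 : ¬(t < (690:Int)) := by omega
                  have hq3 : ¬(t < (810:Int)) := by omega
                  have hq4 : ¬(t < (900:Int)) := by omega
                  have hq5 : ¬(t < (990:Int)) := by omega
                  have hp : (t < (1080:Int)) := by omega
                  rw [if_neg hn0, if_neg hn1, if_neg hn2, if_neg hn3, if_neg hn4, if_neg hn5, if_neg hn6, if_neg hq0, if_neg hq1, if_neg hq2, if_neg hq3, if_neg hq4, if_neg hq5, if_pos hp, if_neg b0, if_neg b1, if_neg b2, if_neg b3, if_neg b4, if_neg b5, if_pos b6]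
              · -- t past period 6; continue
                have hn0 : ¬((510:Int) ≤ t ∧ t ≤ 585) := by omega
                have hq0 : ¬(t < (510:Int)) := by omega
                have hn1 : ¬((600:Int) ≤ t ∧ t ≤ 675) := by omega
                have hq1 : ¬(t < (600:Int)) := by omega
                have hn2 : ¬((690:Int) ≤ t ∧ t ≤ 765) := by omega
                have hq2 : ¬(t < (690:Int)) := by omega
                have hn3 : ¬((810:Int) ≤ t ∧ t ≤ 885) := by omega
                have hq3 : ¬(t < (810:Int)) := by omega
                have hn4 : ¬((900:Int) ≤ t ∧ t ≤ 975) := by omega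
                have hq4 : ¬(t < (900:Int)) := by omega
                have hn5 : ¬((990:Int) ≤ t ∧ t ≤ 1065) := by omega
                have hq5 : ¬(t < (990:Int)) := by omega
                have hn6 : ¬((1080:Int) ≤ t ∧ t ≤ 1155) := by omega
                have hq6 : ¬(t < (1080:Int)) := by omega
                rw [if_neg hn0, if_neg hn1, if_neg hn2, if_neg hn3, if_neg hn4, if_neg hn5, if_neg hn6, if_neg hq0, if_neg hq1, if_neg hq2, if_neg hq3, if_neg hq4, if_neg hq5, if_neg hq6, if_neg b0, if_neg b1, if_neg b2, if_neg b3, if_neg b4, if_neg b5, if_neg b6]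

-- ===== VERDICT (by name: the statement is the Claim_ definition above) =====
theorem time_to_period_py_spec : Claim_equal_time_to_period_py := by
  intro time_str _
  unfold Spec_time_to_period_py time_to_period_py time_to_period_py_alt
  cases pvParseHM time_str with
  | none => rfl
  | some t => exact pvLoops_agree t
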